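-- pv_equiv track=rewrite | github.com/Haidram/codeforces_prblm_solutions | sequence pair weight.py | solve
-- ===== SOURCE A (Python) =====
-- def solve(n,arr):
--     dic = {}
--     for i in range(n):
--         if arr[i] not in dic:
--             dic[arr[i]] = []
--         dic[arr[i]].append(i)
--
--     count = 0
--     for value in dic.values():
--         if len(value) > 1:
--             temp2 = 0
--             for i in value:
--                 temp2 += n-i
--             for i in value:
--                 temp2 -= n-i
--                 temp1 = i+1
--                 count += temp1*temp2
--     return count
-- ===== SOURCE B (Python) =====
-- def solve(n, arr):
--     count = 0
--     seen = {}
--     for j in range(n):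
--         v = arr[j]
--         s = seen.get(v, 0)
--         count += s * (n - j)
--         seen[v] = s + (j + 1)
--     return count
-- ===== Notes on version B (the rewrite author's own statement) =====
-- stated objective: simpler
-- what changed: Replaces the group-then-two-inner-loops scheme (dict of index lists, a suffix-sum pass and a pair pass per group) by one online left-to-right pass that keeps, per value, only the running sum of (i+1) over earlier equal indices and adds it times (n-j) at each j.
import Mathlib
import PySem

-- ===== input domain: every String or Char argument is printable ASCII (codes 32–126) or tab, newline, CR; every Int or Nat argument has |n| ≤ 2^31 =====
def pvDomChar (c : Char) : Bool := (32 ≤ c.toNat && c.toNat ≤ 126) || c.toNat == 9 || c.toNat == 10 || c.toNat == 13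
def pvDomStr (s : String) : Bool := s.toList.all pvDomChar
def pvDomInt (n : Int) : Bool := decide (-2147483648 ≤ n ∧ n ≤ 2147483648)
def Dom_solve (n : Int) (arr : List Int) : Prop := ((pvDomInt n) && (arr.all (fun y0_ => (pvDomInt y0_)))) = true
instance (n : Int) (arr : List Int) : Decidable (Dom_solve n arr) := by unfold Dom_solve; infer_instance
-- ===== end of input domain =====

-- B fuses A's group-then-two-inner-loops scheme into one online pass keeping a running per-value sum (objective: simpler); return values proved equal on Pre_.

-- ===== PORT A =====
-- first loop of A: group the indices 0..n-1 by value (dic[arr[i]].append(i))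
def solveBuild (n : Int) (arr : List Int) : PySem.Dict Int (List Int) :=
  (PySem.List.pyRange 0 n 1).foldl
    (fun dic i =>
      let v := PySem.List.pyGetD arr i 0
      let dic := if dic.contains v then dic else dic.insert v ([] : List Int)
      dic.modify v [] (fun l => l ++ [i]))
    PySem.Dict.empty

-- body of A's second loop: the two inner passes over one group `value`
def solveInner (n : Int) (count : Int) (value : List Int) : Int :=
  if 1 < PySem.List.len value then
    let temp2 := value.foldl (fun t i => t + (n - i)) 0
    (value.foldl
      (fun (p : Int × Int) i =>
        let t2 := p.2 - (n - i)
        let temp1 := i + 1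
        (p.1 + temp1 * t2, t2))
      (count, temp2)).1
  else count

def solve (n : Int) (arr : List Int) : Int :=
  ((solveBuild n arr).values).foldl (solveInner n) 0

-- ===== PORT B =====
def solve_alt (n : Int) (arr : List Int) : Int :=
  ((PySem.List.pyRange 0 n 1).foldl
    (fun (p : Int × PySem.Dict Int Int) j =>
      let v := PySem.List.pyGetD arr j 0
      let s := p.2.getD v 0
      (p.1 + s * (n - j), p.2.insert v (s + (j + 1))))
    (0, PySem.Dict.empty)).1

-- ===== PRECONDITION & SPEC =====
-- Pre_: A indexes arr[i] for every i in range(n), so it raises IndexError iff n > len(arr).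
def Pre_solve (n : Int) (arr : List Int) : Prop := n ≤ PySem.List.len arr
instance (n : Int) (arr : List Int) : Decidable (Pre_solve n arr) := by unfold Pre_solve; infer_instance
def pvWitness_solve : Int × List Int := (3, [1, 2, 1])

def Spec_solve (n : Int) (arr : List Int) (out : Int) : Prop := out = solve_alt n arr
instance (n : Int) (arr : List Int) (out : Int) : Decidable (Spec_solve n arr out) := by unfold Spec_solve; infer_instance

-- ===== CLAIM (what is proved, stated in full; the proofs are below) =====
def Claim_equal_solve : Prop := ∀ (n : Int) (arr : List Int), Dom_solve n arr → Pre_solve n arr → Spec_solve n arr (solve n arr)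

-- ===== LEMMAS AND PROOFS =====

-- the pairs (arr[i], i) for i in range(n), the common spine of both loops
def pvPairs (n : Int) (arr : List Int) : List (Int × Int) :=
  (PySem.List.pyRange 0 n 1).map (fun i => (PySem.List.pyGetD arr i 0, i))

-- indices of value v among the pairs l (in order)
def pvGroup (l : List (Int × Int)) (v : Int) : List Int :=
  (l.filter (fun p => p.1 == v)).map Prod.snd

-- suffix weight Σ (n - i) over a group
def pvW (n : Int) (g : List Int) : Int := (g.map (fun i => n - i)).sum

-- prefix weight Σ (i + 1) over a group
def pvPS (g : List Int) : Int := (g.map (fun i => i + 1)).sum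

-- the pair sum Σ_{i before j in g} (i+1)*(n-j), in A's (left-major) recursion
def pvT (n : Int) : List Int → Int
  | [] => 0
  | j :: rest => (j + 1) * pvW n rest + pvT n rest

-- the common value of both programs
def pvTotal (n : Int) (l : List (Int × Int)) : Int :=
  ((PySem.Set.ofList (l.map Prod.fst)).map (fun v => pvT n (pvGroup l v))).sum

theorem pvT_append (n : Int) (g : List Int) (j : Int) :
    pvT n (g ++ [j]) = pvT n g + pvPS g * (n - j) := by
  induction g with
  | nil => simp [pvT, pvPS, pvW]
  | cons a g ih =>
      simp only [List.cons_append, pvT, ih, pvPS, pvW, List.map_append, List.sum_append,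
        List.map_cons, List.sum_cons, List.map_nil, List.sum_nil]
      ring

theorem pvGroup_append (l : List (Int × Int)) (p : Int × Int) (v : Int) :
    pvGroup (l ++ [p]) v = pvGroup l v ++ (if p.1 = v then [p.2] else []) := by
  simp only [pvGroup, List.filter_append]
  by_cases h : p.1 = v <;> simp [h]

theorem pvGroup_of_not_mem (l : List (Int × Int)) (v : Int) (h : v ∉ l.map Prod.fst) :
    pvGroup l v = [] := by
  simp only [pvGroup, List.map_eq_nil_iff, List.filter_eq_nil_iff]
  intro p hp hpv
  exact h (List.mem_map.mpr ⟨p, hp, by simpa using hpv⟩)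

-- change a sum over a Nodup list at one member
theorem pvSum_update (s : List Int) (hs : s.Nodup) (v : Int) (hv : v ∈ s)
    (f g : Int → Int) (h : ∀ w ∈ s, w ≠ v → g w = f w) :
    (s.map g).sum = (s.map f).sum + (g v - f v) := by
  induction s with
  | nil => cases hv
  | cons a s ih =>
      rcases List.nodup_cons.mp hs with ⟨hna, hns⟩
      rcases List.mem_cons.mp hv with rfl | hv'
      · have : s.map g = s.map f := by
          apply List.map_congr_left
          intro w hw
          exact h w (List.mem_cons_of_mem _ hw) (fun hwv => hna (hwv ▸ hw))
        simp [this]; ring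
      · have ha : g a = f a := h a List.mem_cons_self (fun hav => hna (hav ▸ hv'))
        have := ih hns hv' (fun w hw hwv => h w (List.mem_cons_of_mem _ hw) hwv)
        simp [ha, this]; ring

-- ===== A side =====

theorem solveBuild_getD (l : List (Int × Int)) (d : PySem.Dict Int (List Int)) (v : Int) :
    ((l.foldl (fun d p =>
        let d := if d.contains p.1 then d else d.insert p.1 ([] : List Int)
        d.modify p.1 [] (fun g => g ++ [p.2])) d).getD v [])
      = d.getD v [] ++ pvGroup l v := by
  induction l generalizing d with
  | nil => simp [pvGroup]
  | cons p l ih =>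
      simp only [List.foldl_cons, ih]
      rcases p with ⟨w, i⟩
      have hstep : ∀ d' : PySem.Dict Int (List Int),
          ((if d'.contains w then d' else d'.insert w ([] : List Int)).modify w []
            (fun g => g ++ [i])).getD v [] =
          if v = w then d'.getD w [] ++ [i] else d'.getD v [] := by
        intro d'
        by_cases hc : d'.contains w = true
        · simp [hc, PySem.Dict.getD_modify]
        · have hc' : d'.contains w = false := by simpa using hc
          have h0 : d'.getD w [] = [] := PySem.Dict.getD_of_not_contains d' [] hc'
          simp only [hc, PySem.Dict.getD_modify, h0]
          by_cases hvw : v = w <;> simp [PySem.Dict.getD_insert, hvw]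
      rw [hstep]
      by_cases hvw : v = w
      · subst hvw
        simp [pvGroup]
      · have hne : ((w, i).1 == v) = false := beq_eq_false_iff_ne.mpr (fun h => hvw h.symm)
        simp [hvw, pvGroup, hne]

theorem solveBuild_keys (l : List (Int × Int)) (d : PySem.Dict Int (List Int)) :
    (l.foldl (fun d p =>
        let d := if d.contains p.1 then d else d.insert p.1 ([] : List Int)
        d.modify p.1 [] (fun g => g ++ [p.2])) d).keys
      = PySem.Set.update d.keys (l.map Prod.fst) := by
  induction l generalizing d with
  | nil => simp [PySem.Set.update_nil]
  | cons p l ih =>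
      simp only [List.foldl_cons, ih, List.map_cons, PySem.Set.update_cons]
      congr 1
      rcases p with ⟨w, i⟩
      by_cases hc : d.contains w = true
      · have hmem : w ∈ d.keys := (PySem.Dict.contains_iff_mem_keys d w).mp hc
        simp only [hc, if_true, PySem.Dict.keys_modify,
          PySem.Dict.keys_insert_of_contains d _ hc, PySem.Set.add_of_mem hmem]
      · have hc' : d.contains w = false := by simpa using hc
        have hnmem : w ∉ d.keys := fun hm => by
          simp [(PySem.Dict.contains_iff_mem_keys d w).mpr hm] at hc'
        rw [if_neg hc, PySem.Dict.keys_modify,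
          PySem.Dict.keys_insert_of_contains _ _ (PySem.Dict.contains_insert_self d w []),
          PySem.Dict.keys_insert_of_not_contains d _ hc', PySem.Set.add_of_not_mem hnmem]

theorem solveInner_eq (n : Int) (c : Int) (g : List Int) :
    solveInner n c g = c + pvT n g := by
  have hfold : ∀ (g : List Int) (c : Int),
      (g.foldl (fun (p : Int × Int) i =>
          let t2 := p.2 - (n - i)
          let temp1 := i + 1
          (p.1 + temp1 * t2, t2)) (c, pvW n g)).1 = c + pvT n g := by
    intro g
    induction g with
    | nil => intro c; simp [pvT]
    | cons j g ih =>
        intro c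
        have hW : pvW n (j :: g) - (n - j) = pvW n g := by simp only [pvW, List.map_cons, List.sum_cons]; ring
        simp only [List.foldl_cons, hW, ih, pvT]
        ring
  have htemp2 : ∀ (g : List Int), g.foldl (fun t i => t + (n - i)) 0 = pvW n g := by
    intro g
    rw [PySem.List.foldl_add]
    simp [pvW]
  unfold solveInner
  split_ifs with h
  · rw [htemp2, hfold]
  · -- groups of length ≤ 1 contribute nothing
    rcases g with _ | ⟨j, _ | ⟨k, g⟩⟩
    · simp [pvT]
    · simp [pvT, pvW]
    · exfalso
      simp [PySem.List.len_eq] at h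

theorem solveInner_foldl (n : Int) (gs : List (List Int)) (c : Int) :
    gs.foldl (solveInner n) c = c + (gs.map (pvT n)).sum := by
  induction gs generalizing c with
  | nil => simp
  | cons g gs ih =>
      simp only [List.foldl_cons, solveInner_eq, ih, List.map_cons, List.sum_cons]
      ring

theorem solve_eq_total (n : Int) (arr : List Int) :
    solve n arr = pvTotal n (pvPairs n arr) := by
  unfold solve solveBuild
  have hb : (PySem.List.pyRange 0 n 1).foldl
      (fun dic i =>
        let v := PySem.List.pyGetD arr i 0
        let dic := if dic.contains v then dic else dic.insert v ([] : List Int)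
        dic.modify v [] (fun l => l ++ [i])) PySem.Dict.empty
      = (pvPairs n arr).foldl (fun d p =>
          let d := if d.contains p.1 then d else d.insert p.1 ([] : List Int)
          d.modify p.1 [] (fun g => g ++ [p.2])) PySem.Dict.empty := by
    rw [pvPairs, List.foldl_map]
  rw [hb]
  set l := pvPairs n arr with hl
  set dic := l.foldl (fun d p =>
      let d := if d.contains p.1 then d else d.insert p.1 ([] : List Int)
      d.modify p.1 [] (fun g => g ++ [p.2])) PySem.Dict.empty with hdic
  have hkeys : dic.keys = PySem.Set.ofList (l.map Prod.fst) := by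
    rw [hdic, solveBuild_keys]
    simp [PySem.Dict.keys_empty, PySem.Set.update_nil_left]
  have hnodup : dic.keys.Nodup := by rw [hkeys]; exact PySem.Set.nodup_ofList _
  have hvals : dic.values = dic.keys.map (fun v => dic.getD v []) :=
    PySem.Dict.values_eq_map_keys dic hnodup []
  rw [hvals, solveInner_foldl, hkeys, List.map_map]
  have : ((fun v => pvT n (pvGroup l v)) = (pvT n ∘ fun v => dic.getD v [])) := by
    funext v
    simp only [Function.comp, hdic, solveBuild_getD]
    simp [PySem.Dict.getD_empty]
  rw [pvTotal, this]
  ring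

-- ===== B side =====

theorem solve_alt_invariant (n : Int) (l : List (Int × Int)) :
    (l.foldl (fun (p : Int × PySem.Dict Int Int) q =>
        (p.1 + p.2.getD q.1 0 * (n - q.2), p.2.insert q.1 (p.2.getD q.1 0 + (q.2 + 1))))
      (0, PySem.Dict.empty)).1 = pvTotal n l ∧
    ∀ v, (l.foldl (fun (p : Int × PySem.Dict Int Int) q =>
        (p.1 + p.2.getD q.1 0 * (n - q.2), p.2.insert q.1 (p.2.getD q.1 0 + (q.2 + 1))))
      (0, PySem.Dict.empty)).2.getD v 0 = pvPS (pvGroup l v) := by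
  induction l using List.reverseRecOn with
  | nil => constructor <;> simp [pvTotal, pvGroup, pvPS, PySem.Dict.getD_empty, PySem.Set.ofList_nil]
  | append_singleton l p ih =>
      rcases ih with ⟨ih1, ih2⟩
      rcases p with ⟨v, i⟩
      rw [List.foldl_append] at *
      simp only [List.foldl_cons, List.foldl_nil]
      constructor
      · rw [ih1, ih2]
        -- show pvTotal grows by pvPS (pvGroup l v) * (n - i)
        have hgroups : ∀ w, pvT n (pvGroup (l ++ [(v, i)]) w)
            = pvT n (pvGroup l w) + (if w = v then pvPS (pvGroup l v) * (n - i) else 0) := by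
          intro w
          rw [pvGroup_append]
          by_cases hwv : w = v
          · subst hwv
            rw [if_pos rfl, if_pos rfl]
            exact pvT_append n _ i
          · simp [hwv, Ne.symm hwv]
        by_cases hv : v ∈ l.map Prod.fst
        · have hset : PySem.Set.ofList ((l ++ [(v, i)]).map Prod.fst)
              = PySem.Set.ofList (l.map Prod.fst) := by
            rw [List.map_append, List.map_cons, List.map_nil, PySem.Set.ofList_append_singleton,
              PySem.Set.add_of_mem (by simpa [PySem.Set.mem_ofList] using hv)]
          simp only [pvTotal]
          rw [hset]
          have hvmem : v ∈ PySem.Set.ofList (l.map Prod.fst) := by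
            simpa [PySem.Set.mem_ofList] using hv
          rw [pvSum_update (PySem.Set.ofList (l.map Prod.fst)) (PySem.Set.nodup_ofList _) v hvmem
            (fun w => pvT n (pvGroup l w)) (fun w => pvT n (pvGroup (l ++ [(v, i)]) w))
            (fun w _ hwv => by simp only [hgroups w, if_neg hwv, add_zero])]
          rw [hgroups v, if_pos rfl]
          ring
        · have hset : PySem.Set.ofList ((l ++ [(v, i)]).map Prod.fst)
              = PySem.Set.ofList (l.map Prod.fst) ++ [v] := by
            rw [List.map_append, List.map_cons, List.map_nil, PySem.Set.ofList_append_singleton,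
              PySem.Set.add_of_not_mem (by simpa [PySem.Set.mem_ofList] using hv)]
          have hgl : pvGroup l v = [] := pvGroup_of_not_mem l v hv
          simp only [pvTotal]
          rw [hset, List.map_append, List.sum_append]
          have hrest : (PySem.Set.ofList (l.map Prod.fst)).map
              (fun w => pvT n (pvGroup (l ++ [(v, i)]) w))
              = (PySem.Set.ofList (l.map Prod.fst)).map (fun w => pvT n (pvGroup l w)) := by
            apply List.map_congr_left
            intro w hw
            have hwv : w ≠ v := fun h => hv (h ▸ (PySem.Set.mem_ofList _ _).mp hw)
            simp only [hgroups w, if_neg hwv, add_zero]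
          rw [hrest]
          simp only [List.map_cons, List.map_nil, List.sum_cons, List.sum_nil]
          rw [hgroups v, if_pos rfl, hgl]
          simp [pvT, pvPS]
      · intro w
        rw [PySem.Dict.getD_insert, pvGroup_append]
        by_cases hwv : w = v
        · subst hwv
          simp [pvPS, ih2]
        · simp [hwv, Ne.symm hwv, ih2]

theorem solve_alt_eq_total (n : Int) (arr : List Int) :
    solve_alt n arr = pvTotal n (pvPairs n arr) := by
  unfold solve_alt
  have h : (PySem.List.pyRange 0 n 1).foldl
      (fun (p : Int × PySem.Dict Int Int) j =>
        let v := PySem.List.pyGetD arr j 0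
        let s := p.2.getD v 0
        (p.1 + s * (n - j), p.2.insert v (s + (j + 1))))
      (0, PySem.Dict.empty)
      = (pvPairs n arr).foldl (fun (p : Int × PySem.Dict Int Int) q =>
          (p.1 + p.2.getD q.1 0 * (n - q.2), p.2.insert q.1 (p.2.getD q.1 0 + (q.2 + 1))))
        (0, PySem.Dict.empty) := by
    rw [pvPairs, List.foldl_map]
  rw [h]
  exact (solve_alt_invariant n (pvPairs n arr)).1

-- ===== VERDICT (by name: the statement is the Claim_ definition above) =====
theorem solve_spec : Claim_equal_solve := by
  intro n arr _ _
  show solve n arr = solve_alt n arr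
  rw [solve_eq_total, solve_alt_eq_total]
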